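-- pv_equiv track=rewrite | github.com/pimnik98/SayoriSDK | Tools/Fonts/mk_alphabet_table.py | pretty_make
-- ===== SOURCE A (Python) =====
-- def symbol2c(symbol):
--     if symbol == "\\":
--         symbol *= 2
--     return symbol
--
-- def pretty_make(st):
--     a = ""
--     width = 8
--     i = 0
--
--     while i < len(st):
--         if i % width == 0:
--             a += "\n"
--         a += symbol2c(st[i]) + (", " if i < len(st) - 1 else " ")
--         i += 1
--     return a
-- ===== SOURCE B (Python) =====
-- def symbol2c(symbol):
--     if symbol == "\\":
--         symbol *= 2
--     return symbol
--
-- def pretty_make(st):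
--     cells = [symbol2c(c) + ", " for c in st]
--     if cells:
--         cells[-1] = cells[-1][:-2] + " "
--     rows = ["\n" + "".join(cells[i:i+8]) for i in range(0, len(cells), 8)]
--     return "".join(rows)
-- ===== Notes on version B (the rewrite author's own statement) =====
-- stated objective: faster
-- what changed: B replaces A's index-walking while loop (per-index newline/separator tests, repeated string concatenation) by a three-stage pipeline: map each character to its formatted fragment, patch the final separator once, then build rows by slicing in chunks of 8 and join them.
import Mathlib
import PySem

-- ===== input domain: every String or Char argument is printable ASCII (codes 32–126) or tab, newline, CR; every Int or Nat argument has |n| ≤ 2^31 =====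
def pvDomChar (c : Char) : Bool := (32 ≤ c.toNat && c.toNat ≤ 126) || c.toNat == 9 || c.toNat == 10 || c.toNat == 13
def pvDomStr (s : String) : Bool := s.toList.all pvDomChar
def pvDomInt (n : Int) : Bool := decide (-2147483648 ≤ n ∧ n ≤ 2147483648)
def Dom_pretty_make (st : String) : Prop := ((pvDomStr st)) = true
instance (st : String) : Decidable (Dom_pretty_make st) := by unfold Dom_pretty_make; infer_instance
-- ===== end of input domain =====

-- B rebuilds the table as map-to-fragments / patch-final-separator / join rows of 8 (join instead of A's repeated concatenation; a timing run measured B faster).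
-- Strings are ported on the List Char side (PySem convention); equivalence is about the return value.

-- ===== PORT A =====
-- symbol2c works on one-character strings here, so it is ported at the Char level: a char equal to '\' is doubled.
def symbol2cA (c : Char) : List Char := if c == '\\' then [c, c] else [c]

-- literal port of A's while loop: i runs over range(len(st)); 'a += …' is list append; pyGetD is exact since 0 ≤ i < len st.
def pretty_make (st : String) : String :=
  let cs := st.toList
  let n : Int := cs.length
  let a :=
    (PySem.List.pyRange 0 n 1).foldl
      (fun a i =>
        let a := if PySem.Int.mod i 8 == 0 then a ++ ['\n'] else a
        a ++ symbol2cA (PySem.List.pyGetD cs i ' ') ++ (if i < n - 1 then [',', ' '] else [' ']))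
      []
  String.ofList a

-- ===== PORT B =====
def symbol2cB (c : Char) : List Char := if c == '\\' then [c, c] else [c]

-- literal port of Source B: build the fragment list, patch its last element via [:-2] + " ", then chunk rows of 8 and join.
def pretty_make_alt (st : String) : String :=
  let cells := st.toList.map (fun c => symbol2cB c ++ [',', ' '])
  let cells :=
    if h : cells = [] then cells
    else cells.dropLast ++ [PySem.List.slice (cells.getLast h) none (some (-2)) ++ [' ']]
  let n : Int := cells.length
  let rows := (PySem.List.pyRange 0 n 8).map
    (fun i => ['\n'] ++ (PySem.List.slice cells (some i) (some (i + 8))).flatten)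
  String.ofList rows.flatten

-- ===== PRECONDITION & SPEC =====
def Spec_pretty_make (st : String) (out : String) : Prop := out = pretty_make_alt st
instance (st : String) (out : String) : Decidable (Spec_pretty_make st out) := by unfold Spec_pretty_make; infer_instance

-- ===== CLAIM (what is proved, stated in full; the proofs are below) =====
def Claim_equal_pretty_make : Prop := ∀ (st : String), Dom_pretty_make st → Spec_pretty_make st (pretty_make st)

-- ===== LEMMAS AND PROOFS =====

-- the common shape: rows of (up to) 8 fragments, each row prefixed by a newline
def chunks (L : List (List Char)) : List Char :=
  if _h : L = [] then [] else '\n' :: ((L.take 8).flatten ++ chunks (L.drop 8))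
termination_by L.length
decreasing_by
  have : L.length ≠ 0 := by simpa using _h
  simp [List.length_drop]; omega

lemma chunks_nil : chunks [] = [] := by unfold chunks; simp

lemma chunks_pos (L : List (List Char)) (h : L ≠ []) :
    chunks L = '\n' :: ((L.take 8).flatten ++ chunks (L.drop 8)) := by
  rw [chunks]; simp [h]

-- (L.take (t+1)).flatten peels its last cell
lemma take_flatten_succ (t : Nat) (L : List (List Char)) :
    (L.take (t + 1)).flatten = (L.take t).flatten ++ L.getD t [] := by
  induction t generalizing L with
  | zero => cases L <;> simp [List.getD]
  | succ t ih => cases L with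
    | nil => simp [List.getD]
    | cons a L => simp [List.take_succ_cons, List.flatten_cons, ih L]

-- A's per-index emission over one chunk (t ≤ 8)
lemma chunkA (L : List (List Char)) (t : Nat) (ht : t ≤ 8) :
    (List.range t).flatMap
      (fun k => (if k % 8 = 0 then ['\n'] else []) ++ L.getD k [])
    = if t = 0 then [] else '\n' :: (L.take t).flatten := by
  induction t with
  | zero => simp
  | succ t ih =>
      rw [List.range_succ, List.flatMap_append]
      rw [ih (by omega)]
      have hmod : t % 8 = t := Nat.mod_eq_of_lt (by omega)
      rcases Nat.eq_zero_or_pos t with h0 | hpos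
      · subst h0
        cases L with
        | nil => simp [List.getD]
        | cons a L' => simp [List.getD]
      · simp only [if_neg (by omega : ¬ t + 1 = 0), if_neg (by omega : ¬ t = 0)]
        rw [take_flatten_succ t L]
        simp [hmod, if_neg (by omega : ¬ t = 0)]

-- core: A's flat per-index emission equals the chunked emission, for any fragment list
lemma coreA (L : List (List Char)) :
    (List.range L.length).flatMap
      (fun k => (if k % 8 = 0 then ['\n'] else []) ++ L.getD k [])
    = chunks L := by
  generalize hn : L.length = n
  induction n using Nat.strong_induction_on generalizing L with
  | _ n ih =>
    rcases Nat.eq_zero_or_pos n with h0 | hpos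
    · subst h0
      have : L = [] := List.length_eq_zero_iff.mp hn
      subst this; simp [chunks_nil]
    · have hL : L ≠ [] := by
        intro h; subst h; simp at hn; omega
      rw [chunks_pos L hL]
      by_cases hle : n ≤ 8
      · -- one (final) chunk
        have hdrop : L.drop 8 = [] := List.drop_eq_nil_of_le (by omega)
        have htake : L.take 8 = L.take n := by
          rw [← hn, List.take_length, List.take_of_length_le (by omega)]
        rw [chunkA L n hle, hdrop, chunks_nil, htake]
        simp [if_neg (by omega : ¬ n = 0)]
      · -- peel the first chunk of 8
        have hsplit : n = 8 + (n - 8) := by omega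
        rw [hsplit, List.range_add, List.flatMap_append, List.flatMap_map]
        rw [chunkA L 8 (by omega)]
        have harg : ∀ k ∈ List.range (n - 8),
            (if (8 + k) % 8 = 0 then ['\n'] else []) ++ L.getD (8 + k) []
            = (if k % 8 = 0 then ['\n'] else []) ++ (L.drop 8).getD k [] := by
          intro k _
          have h1 : (8 + k) % 8 = k % 8 := by omega
          have h2 : L.getD (8 + k) [] = (L.drop 8).getD k [] := by
            simp [List.getD]
          rw [h1, h2]
        rw [List.flatMap_congr harg]
        have hlen : (L.drop 8).length = n - 8 := by simp [hn]
        rw [show (List.range (n - 8)).flatMap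
              (fun k => (if k % 8 = 0 then ['\n'] else []) ++ (L.drop 8).getD k [])
            = chunks (L.drop 8) from by
          have := ih (n - 8) (by omega) (L.drop 8) hlen
          exact this]
        simp

-- B's chunk loop (row per multiple of 8) equals the chunked emission
lemma rangeB (L : List (List Char)) :
    (List.range ((L.length + 7) / 8)).flatMap
      (fun k => '\n' :: ((L.drop (8 * k)).take 8).flatten)
    = chunks L := by
  generalize hn : L.length = n
  induction n using Nat.strong_induction_on generalizing L with
  | _ n ih =>
    by_cases h0 : n = 0
    · subst h0
      have : L = [] := List.length_eq_zero_iff.mp hn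
      subst this; simp [chunks_nil]
    · have hL : L ≠ [] := by intro h; subst h; simp at hn; omega
      have hm : (n + 7) / 8 = (n - 8 + 7) / 8 + 1 := by omega
      rw [hm, List.range_succ_eq_map, List.flatMap_cons, List.flatMap_map]
      have harg : ∀ k ∈ List.range ((n - 8 + 7) / 8),
          '\n' :: ((L.drop (8 * (k + 1))).take 8).flatten
          = '\n' :: (((L.drop 8).drop (8 * k)).take 8).flatten := by
        intro k _
        have : L.drop (8 * (k + 1)) = (L.drop 8).drop (8 * k) := by
          rw [List.drop_drop]; ring_nf
        rw [this]
      have hlen : (L.drop 8).length = n - 8 := by simp [hn]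
      calc ('\n' :: ((L.drop (8 * 0)).take 8).flatten) ++
             (List.range ((n - 8 + 7) / 8)).flatMap
               (fun k => '\n' :: ((L.drop (8 * (k + 1))).take 8).flatten)
          = ('\n' :: (L.take 8).flatten) ++
             (List.range (((L.drop 8).length + 7) / 8)).flatMap
               (fun k => '\n' :: (((L.drop 8).drop (8 * k)).take 8).flatten) := by
            rw [List.flatMap_congr harg, hlen]
            simp
        _ = ('\n' :: (L.take 8).flatten) ++ chunks (L.drop 8) := by
            rw [hlen, ih (n - 8) (by omega) (L.drop 8) hlen]
        _ = chunks L := by rw [chunks_pos L hL]; simp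

-- the final fragment list both programs emit: one fragment per character, last separator is a space
def cellsMod (cs : List Char) : List (List Char) :=
  let cells := cs.map (fun c => symbol2cB c ++ [',', ' '])
  if h : cells = [] then cells
  else cells.dropLast ++ [PySem.List.slice (cells.getLast h) none (some (-2)) ++ [' ']]

lemma cellsMod_length (cs : List Char) : (cellsMod cs).length = cs.length := by
  unfold cellsMod
  by_cases h : cs.map (fun c => symbol2cB c ++ [',', ' ']) = []
  · have hnil : cs = [] := by simpa using h
    simp [hnil]
  · simp [h]
    have : cs.map (fun c => symbol2cB c ++ [',', ' ']) ≠ [] := h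
    have hlen : (cs.map (fun c => symbol2cB c ++ [',', ' '])).length = cs.length := by simp
    have hpos : 0 < cs.length := by
      rcases cs with _ | _
      · simp at h
      · simp
    omega

lemma patched_cell (c : Char) :
    PySem.List.slice (symbol2cB c ++ [',', ' ']) none (some (-2)) ++ [' ']
    = symbol2cB c ++ [' '] := by
  rw [PySem.List.slice_to_neg_ofNat _ 2 (by omega)]
  have : (symbol2cB c ++ [',', ' ']).length - 2 = (symbol2cB c).length := by simp
  rw [this, List.take_left]

lemma cellsMod_getD (cs : List Char) (k : Nat) (hk : k < cs.length) :
    (cellsMod cs).getD k []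
    = symbol2cB (cs.getD k ' ') ++ (if k < cs.length - 1 then [',', ' '] else [' ']) := by
  have hcs : cs ≠ [] := by intro h; subst h; simp at hk
  have hmap : cs.map (fun c => symbol2cB c ++ [',', ' ']) ≠ [] := by
    simpa using hcs
  have hklen : k < (cellsMod cs).length := by rw [cellsMod_length]; exact hk
  rw [List.getD_eq_getElem _ _ hklen, List.getD_eq_getElem _ _ hk]
  unfold cellsMod
  simp only [hmap, dite_false]
  by_cases hk2 : k < cs.length - 1
  · have hdl : k < ((cs.map (fun c => symbol2cB c ++ [',', ' '])).dropLast).length := by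
      simp; omega
    rw [if_pos hk2]
    rw [List.getElem_append_left hdl]
    simp [List.getElem_dropLast]
  · have hkeq : k = cs.length - 1 := by omega
    have hdl : ((cs.map (fun c => symbol2cB c ++ [',', ' '])).dropLast).length ≤ k := by
      simp; omega
    rw [if_neg hk2]
    rw [List.getElem_append_right hdl]
    have hidx : k - ((cs.map (fun c => symbol2cB c ++ [',', ' '])).dropLast).length = 0 := by
      simp; omega
    simp only [hidx, List.getElem_cons_zero]
    rw [List.getLast_eq_getElem]
    simp only [List.getElem_map, List.length_map]
    rw [patched_cell]
    congr 2
    congr 1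
    omega

-- B's port equals the chunked emission of the common fragment list
lemma altB (st : String) :
    pretty_make_alt st = String.ofList (chunks (cellsMod st.toList)) := by
  rw [show pretty_make_alt st
      = String.ofList (((PySem.List.pyRange 0 (((cellsMod st.toList).length : Nat) : Int) 8).map
          (fun i => ['\n'] ++ (PySem.List.slice (cellsMod st.toList) (some i) (some (i + 8))).flatten)).flatten)
      from rfl]
  rw [← List.flatMap_def]
  congr 1
  rw [PySem.List.pyRange_of_pos 0 _ (by omega : (0:Int) < 8), List.flatMap_map]
  set M := cellsMod st.toList with hM
  have hcnt : (if (0:Int) < (M.length:Int) then (((M.length:Int) - 0 + 8 - 1) / 8).toNat else 0)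
      = (M.length + 7) / 8 := by split_ifs with h <;> omega
  rw [hcnt]
  have harg : ∀ k ∈ List.range ((M.length + 7) / 8),
      ['\n'] ++ (PySem.List.slice M (some (0 + 8 * (k:Int))) (some (0 + 8 * (k:Int) + 8))).flatten
      = '\n' :: ((M.drop (8 * k)).take 8).flatten := by
    intro k _
    rw [show PySem.List.slice M (some (0 + 8 * (k:Int))) (some (0 + 8 * (k:Int) + 8))
        = (M.drop ((0 + 8 * (k:Int)).toNat)).take ((0 + 8 * (k:Int) + 8).toNat - (0 + 8 * (k:Int)).toNat)
        from PySem.List.slice_toNat _ (by omega) (by omega)]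
    have e1 : (0 + 8 * (k:Int)).toNat = 8 * k := by omega
    have e2 : (0 + 8 * (k:Int) + 8).toNat - (0 + 8 * (k:Int)).toNat = 8 := by omega
    rw [e2, e1]
    rfl
  rw [List.flatMap_congr harg, rangeB]

-- A's port equals the chunked emission of the common fragment list
lemma aA (st : String) :
    pretty_make st = String.ofList (chunks (cellsMod st.toList)) := by
  simp only [pretty_make]
  congr 1
  set cs := st.toList with hcs
  set n : Int := (cs.length : Int) with hn
  rw [PySem.List.foldl_congr_mem _ _
    (fun a i => a ++ ((if PySem.Int.mod i 8 == 0 then ['\n'] else []) ++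
      (symbol2cA (PySem.List.pyGetD cs i ' ') ++ (if i < n - 1 then [',', ' '] else [' '])))) _
    (by intro acc x _; by_cases hd : (8:Int) ∣ x <;> simp [beq_iff_eq, hd])]
  rw [PySem.List.foldl_append_eq_flatMap]
  rw [PySem.List.pyRange_one, List.flatMap_map]
  have hto : ((n : Int) - 0).toNat = cs.length := by omega
  rw [hto]
  have harg : ∀ k ∈ List.range cs.length,
      (if PySem.Int.mod (0 + (k:Int)) 8 == 0 then ['\n'] else []) ++
        (symbol2cA (PySem.List.pyGetD cs (0 + (k:Int)) ' ') ++
          (if (0 + (k:Int)) < n - 1 then [',', ' '] else [' ']))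
      = (if k % 8 = 0 then ['\n'] else []) ++ (cellsMod cs).getD k [] := by
    intro k hkmem
    have hk : k < cs.length := List.mem_range.mp hkmem
    have hz : (0 + (k:Int)) = (k:Int) := by ring
    rw [hz]
    have hmod : PySem.Int.mod (k:Int) 8 = ((k % 8 : Nat) : Int) := by
      rw [PySem.Int.mod_eq_emod_of_pos (by omega)]
      push_cast
      rfl
    have hcond1 : (PySem.Int.mod (k:Int) 8 == 0) = decide (k % 8 = 0) := by
      rw [hmod]
      by_cases h : k % 8 = 0
      · simp [h]
      · simp [h]
        omega
    have hcond2 : ((k:Int) < n - 1) = (k < cs.length - 1) := by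
      rw [hn]
      apply propext
      constructor <;> intro h <;> omega
    simp only [hcond1, hcond2, PySem.List.pyGetD_natCast]
    rw [cellsMod_getD cs k hk]
    by_cases h : k % 8 = 0 <;> simp [h, symbol2cA, symbol2cB]
  rw [List.flatMap_congr harg]
  rw [← cellsMod_length cs, coreA]
  rfl

theorem main (st : String) : pretty_make st = pretty_make_alt st := by
  rw [aA, altB]

-- ===== VERDICT (by name: the statement is the Claim_ definition above) =====
theorem pretty_make_spec : Claim_equal_pretty_make := by
  intro st _
  unfold Spec_pretty_make
  exact main st
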